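-- pv_equiv track=rewrite | github.com/paulsinnett/single-letter-frequency-counts | count.py | convert_to_types
-- ===== SOURCE A (Python) =====
-- from collections import Counter
--
-- def convert_to_types(sample_list):
-- 	types = {}
-- 	for word in sample_list:
-- 		length = len(word)
-- 		if length not in types:
-- 			types[length] = Counter()
-- 		types[length][word] += 1
-- 	return types
-- ===== SOURCE B (Python) =====
-- from collections import Counter
--
-- def convert_to_types(sample_list):
--     lengths = dict.fromkeys(len(word) for word in sample_list)
--     return {length: Counter(word for word in sample_list if len(word) == length)
--             for length in lengths}
-- ===== Notes on version B (the rewrite author's own statement) =====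
-- stated objective: alternative
-- what changed: B first collects the distinct word lengths in first-occurrence order and then builds each length's Counter by an independent scan over the filtered list (staged key-discovery plus per-bucket recount, O(n*k)), instead of A's single pass that increments inside a length-keyed Counter.
import Mathlib
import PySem

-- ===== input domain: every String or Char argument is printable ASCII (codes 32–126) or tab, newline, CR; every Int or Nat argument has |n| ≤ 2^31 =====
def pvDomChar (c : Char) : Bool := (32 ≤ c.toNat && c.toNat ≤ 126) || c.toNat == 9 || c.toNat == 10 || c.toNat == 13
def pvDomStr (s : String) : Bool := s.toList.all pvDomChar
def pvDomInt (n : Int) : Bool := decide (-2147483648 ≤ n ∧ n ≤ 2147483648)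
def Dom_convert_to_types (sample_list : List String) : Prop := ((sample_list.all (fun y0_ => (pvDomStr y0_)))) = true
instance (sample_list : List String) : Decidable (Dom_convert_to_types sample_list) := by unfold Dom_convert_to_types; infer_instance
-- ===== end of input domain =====

-- B first collects the distinct word lengths in first-occurrence order and then builds each
-- length's Counter by an independent scan of the filtered list, instead of A's single
-- incremental pass; an alternative staged decomposition, not claimed faster.

-- ===== PORT A =====
def convert_to_types (sample_list : List String) : List (Int × List (String × Int)) :=
  let types := sample_list.foldl
    (fun d word =>
      let length := PySem.Str.len word
      let d := if d.contains length then d else d.insert length PySem.Dict.empty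
      d.modify length PySem.Dict.empty (fun c => c.modify word 0 (· + 1)))
    PySem.Dict.empty
  types.items.map (fun q => (q.1, q.2.items))

-- ===== PORT B =====
def convert_to_types_alt (sample_list : List String) : List (Int × List (String × Int)) :=
  let lengths := PySem.List.dedup (sample_list.map PySem.Str.len)
  let types := lengths.foldl
    (fun d length =>
      d.insert length
        (PySem.Dict.counter (sample_list.filter (fun word => PySem.Str.len word == length))))
    PySem.Dict.empty
  types.items.map (fun q => (q.1, q.2.items))

-- ===== PRECONDITION & SPEC =====
def Spec_convert_to_types (sample_list : List String) (out : List (Int × List (String × Int))) : Prop := out = convert_to_types_alt sample_list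
instance (sample_list : List String) (out : List (Int × List (String × Int))) : Decidable (Spec_convert_to_types sample_list out) := by unfold Spec_convert_to_types; infer_instance

-- ===== CLAIM (what is proved, stated in full; the proofs are below) =====
def Claim_equal_convert_to_types : Prop := ∀ (sample_list : List String), Dom_convert_to_types sample_list → Spec_convert_to_types sample_list (convert_to_types sample_list)

-- ===== LEMMAS AND PROOFS =====

-- the loop body of port A (let-free, definitionally equal to the port's lambda)
def pvStepA (d : PySem.Dict Int (PySem.Dict String Int)) (word : String) :
    PySem.Dict Int (PySem.Dict String Int) :=
  (if d.contains (PySem.Str.len word) then d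
   else d.insert (PySem.Str.len word) PySem.Dict.empty).modify
    (PySem.Str.len word) PySem.Dict.empty (fun c => c.modify word 0 (· + 1))

-- Set.ofList over an appended element
theorem pv_ofList_append_singleton {α : Type} [BEq α] (xs : List α) (x : α) :
    PySem.Set.ofList (xs ++ [x]) = PySem.Set.add (PySem.Set.ofList xs) x := by
  simp [PySem.Set.ofList, List.foldl_append]

-- outer keys of A's loop: first occurrence of each length, in order
theorem pv_keysA (xs : List String) :
    (xs.foldl pvStepA PySem.Dict.empty).keys = PySem.Set.ofList (xs.map PySem.Str.len) := by
  induction xs using List.reverseRecOn with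
  | nil => rfl
  | append_singleton xs w ih =>
    rw [List.foldl_append, List.foldl_cons, List.foldl_nil, List.map_append, List.map_cons,
        List.map_nil, pv_ofList_append_singleton, ← ih]
    set d := xs.foldl pvStepA PySem.Dict.empty with hd
    unfold pvStepA
    by_cases h : d.contains (PySem.Str.len w) = true
    · rw [if_pos h, PySem.Dict.keys_modify, PySem.Dict.keys_insert_of_contains _ _ h,
          PySem.Set.add, if_pos (by
            simpa [PySem.Set.contains, PySem.Dict.contains_eq_decide_mem_keys] using h)]
    · have h' : d.contains (PySem.Str.len w) = false := by
        revert h; cases d.contains (PySem.Str.len w) <;> simp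
      rw [if_neg h, PySem.Dict.keys_modify,
          PySem.Dict.keys_insert_of_contains _ _ (PySem.Dict.contains_insert_self _ _ _),
          PySem.Dict.keys_insert_of_not_contains _ _ h',
          PySem.Set.add, if_neg (by
            simpa [PySem.Set.contains, PySem.Dict.contains_eq_decide_mem_keys] using h)]

-- the bucket of length L after A's loop is the Counter of the words of that length
theorem pv_getA (xs : List String) (L : Int) :
    (xs.foldl pvStepA PySem.Dict.empty).getD L PySem.Dict.empty
      = PySem.Dict.counter (xs.filter (fun w => PySem.Str.len w == L)) := by
  induction xs using List.reverseRecOn with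
  | nil => rfl
  | append_singleton xs w ih =>
    rw [List.foldl_append, List.foldl_cons, List.foldl_nil, List.filter_append]
    set d := xs.foldl pvStepA PySem.Dict.empty with hd
    by_cases hL : PySem.Str.len w = L
    · subst hL
      have hstep : (pvStepA d w).getD (PySem.Str.len w) PySem.Dict.empty
          = (d.getD (PySem.Str.len w) PySem.Dict.empty).modify w 0 (· + 1) := by
        unfold pvStepA
        by_cases h : d.contains (PySem.Str.len w) = true
        · rw [if_pos h, PySem.Dict.getD_modify_self]
        · have h' : d.contains (PySem.Str.len w) = false := by
            revert h; cases d.contains (PySem.Str.len w) <;> simp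
          rw [if_neg h, PySem.Dict.getD_modify_self, PySem.Dict.getD_insert_self,
              PySem.Dict.getD_of_not_contains d _ h']
      rw [hstep, ih, show List.filter (fun u => PySem.Str.len u == PySem.Str.len w) [w] = [w]
            by simp, PySem.Dict.counter_append_singleton]
    · have hstep : (pvStepA d w).getD L PySem.Dict.empty = d.getD L PySem.Dict.empty := by
        unfold pvStepA
        by_cases h : d.contains (PySem.Str.len w) = true
        · rw [if_pos h, PySem.Dict.getD_modify_of_ne _ _ _ (Ne.symm hL)]
        · rw [if_neg h, PySem.Dict.getD_modify_of_ne _ _ _ (Ne.symm hL),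
              PySem.Dict.getD_insert_of_ne _ _ _ (Ne.symm hL)]
      rw [hstep, ih, show List.filter (fun u => PySem.Str.len u == L) [w] = ([] : List String)
            by simpa using hL, List.append_nil]

-- ===== VERDICT (by name: the statement is the Claim_ definition above) =====
theorem convert_to_types_spec : Claim_equal_convert_to_types := by
  intro xs _
  unfold Spec_convert_to_types convert_to_types convert_to_types_alt
  show (xs.foldl pvStepA PySem.Dict.empty).items.map (fun q => (q.1, q.2.items))
     = ((PySem.List.dedup (xs.map PySem.Str.len)).foldl
          (fun d L => d.insert L (PySem.Dict.counter (xs.filter (fun w => PySem.Str.len w == L))))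
          PySem.Dict.empty).items.map (fun q => (q.1, q.2.items))
  have hded : PySem.List.dedup (xs.map PySem.Str.len)
      = PySem.Set.ofList (xs.map PySem.Str.len) := by
    simp [PySem.List.dedup_eq_ofList]
  have hndL : (PySem.List.dedup (xs.map PySem.Str.len)).Nodup := by
    rw [hded]; exact PySem.Set.nodup_ofList _
  -- B's fold inserts distinct fresh keys, so its items are just the mapped list
  have hB : ((PySem.List.dedup (xs.map PySem.Str.len)).foldl
        (fun d L => d.insert L (PySem.Dict.counter (xs.filter (fun w => PySem.Str.len w == L))))
        PySem.Dict.empty).items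
      = (PySem.List.dedup (xs.map PySem.Str.len)).map
          (fun L => (L, PySem.Dict.counter (xs.filter (fun w => PySem.Str.len w == L)))) := by
    have h := PySem.Dict.items_foldl_insert_fresh
          (l := PySem.List.dedup (xs.map PySem.Str.len)) (k := fun (L : Int) => L)
          (v := fun L => PySem.Dict.counter (xs.filter (fun w => PySem.Str.len w == L)))
          (d := PySem.Dict.empty)
          (fun a _ => PySem.Dict.contains_empty _)
          (by simpa using hndL)
    simpa [PySem.Dict.items, PySem.Dict.empty] using h
  have hnodupA : (xs.foldl pvStepA PySem.Dict.empty).keys.Nodup := by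
    rw [pv_keysA]; exact PySem.Set.nodup_ofList _
  rw [PySem.Dict.items_eq_map_keys _ hnodupA PySem.Dict.empty, pv_keysA, hB,
      List.map_map, List.map_map, ← hded]
  apply List.map_congr_left
  intro L _
  simp only [Function.comp_apply]
  rw [pv_getA]
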